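-- pv_equiv track=rewrite | github.com/samosbor/Lyrics-Scraping | scraping.py | score_bw
-- ===== SOURCE A (Python) =====
-- def score_bw(bw_list):
--     #this function scores each bad word on a scale of 1-10 for how offensive it is
--     #probably just going to list the worst 10 swear words and give it a score of 10 and leave
--     #all the other swear words at a one
--     really_bw = ['fuck', 'cunt', 'pussy', 'bitch', 'dick', 'fucker',
--     'ass', 'ballsack', 'whore', 'nigga', 'nigger'
--     ]
--     count = 0
--     for i in bw_list:
--         if i in really_bw:
--             count += 10
--         else:
--             count += 1
--     return count
-- ===== SOURCE B (Python) =====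
-- def score_bw(bw_list):
--     really_bw = ['fuck', 'cunt', 'pussy', 'bitch', 'dick', 'fucker',
--     'ass', 'ballsack', 'whore', 'nigga', 'nigger'
--     ]
--     counts = {}
--     for w in bw_list:
--         counts[w] = counts.get(w, 0) + 1
--     total = len(bw_list)
--     for b in really_bw:
--         total += 9 * counts.get(b, 0)
--     return total
-- ===== Notes on version B (the rewrite author's own statement) =====
-- stated objective: alternative
-- what changed: Instead of testing each input word against the bad-word list, B builds a frequency dictionary of the input once and then iterates over the fixed bad-word list, adding 9 per occurrence via dictionary lookups, starting from len(bw_list).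
import Mathlib
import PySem

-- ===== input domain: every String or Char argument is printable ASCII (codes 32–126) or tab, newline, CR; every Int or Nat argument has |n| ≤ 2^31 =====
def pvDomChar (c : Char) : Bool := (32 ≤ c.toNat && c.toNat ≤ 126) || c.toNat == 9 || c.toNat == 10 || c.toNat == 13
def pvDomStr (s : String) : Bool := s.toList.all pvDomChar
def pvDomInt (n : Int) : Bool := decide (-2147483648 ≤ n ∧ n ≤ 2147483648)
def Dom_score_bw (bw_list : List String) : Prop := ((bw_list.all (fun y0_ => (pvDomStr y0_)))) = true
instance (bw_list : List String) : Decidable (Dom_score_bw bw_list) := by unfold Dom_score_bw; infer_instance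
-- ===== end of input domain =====

-- B replaces A's per-word membership loop by a frequency dictionary of the input plus a pass
-- over the fixed bad-word list (objective: alternative).

def really_bw : List String := ["fuck", "cunt", "pussy", "bitch", "dick", "fucker",
  "ass", "ballsack", "whore", "nigga", "nigger"]

-- ===== PORT A =====
-- loop: count += 10 if i in really_bw else 1
def score_bw (bw_list : List String) : Int :=
  bw_list.foldl (fun count i => if i ∈ really_bw then count + 10 else count + 1) 0

-- ===== PORT B =====
-- counts[w] = counts.get(w, 0) + 1 over bw_list; then total += 9 * counts.get(b, 0) over really_bw
def score_bw_alt (bw_list : List String) : Int :=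
  let counts : PySem.Dict String Int :=
    bw_list.foldl (fun d w => d.insert w (d.getD w 0 + 1)) PySem.Dict.empty
  really_bw.foldl (fun total b => total + 9 * counts.getD b 0) (bw_list.length : Int)

-- ===== PRECONDITION & SPEC =====
def Spec_score_bw (bw_list : List String) (out : Int) : Prop := out = score_bw_alt bw_list
instance (bw_list : List String) (out : Int) : Decidable (Spec_score_bw bw_list out) := by unfold Spec_score_bw; infer_instance

-- ===== CLAIM =====
def Claim_equal_score_bw : Prop := ∀ (bw_list : List String), Dom_score_bw bw_list → Spec_score_bw bw_list (score_bw bw_list)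

-- ===== LEMMAS AND PROOFS =====
-- A's loop: closed form len + 9 * (number of offensive words)
lemma score_bw_foldl_acc (l : List String) (c : Int) :
    l.foldl (fun count i => if i ∈ really_bw then count + 10 else count + 1) c
      = c + l.length + 9 * (l.countP (fun x => decide (x ∈ really_bw)) : Int) := by
  induction l generalizing c with
  | nil => simp
  | cons x xs ih =>
    simp only [List.foldl_cons, ih, List.countP_cons, List.length_cons]
    by_cases h : x ∈ really_bw <;> simp [h] <;> ring

-- B's outer loop: accumulate 9 * count for each bad word
lemma foldl_nine_count (bs : List String) (l : List String) (c : Int) :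
    bs.foldl (fun total b => total + 9 * (l.count b : Int)) c
      = c + 9 * ((bs.map (fun b => (l.count b : Int))).sum) := by
  induction bs generalizing c with
  | nil => simp
  | cons b bs ih => simp only [List.foldl_cons, List.map_cons, List.sum_cons, ih]; ring

lemma sum_indicator_count (bs : List String) (x : String) :
    (bs.map (fun b => if b == x then (1 : Int) else 0)).sum = (bs.count x : Int) := by
  induction bs with
  | nil => simp
  | cons b bs ih =>
    rw [List.map_cons, List.sum_cons, ih, List.count_cons]
    by_cases h : b = x
    · subst h; simp; ring
    · have h1 : (b == x) = false := by simp [h]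
      have h2 : ¬ x = b := fun e => h e.symm
      simp [h1]

lemma sum_counts_eq_countP (l : List String) :
    ((really_bw.map (fun b => (l.count b : Int))).sum)
      = (l.countP (fun x => decide (x ∈ really_bw)) : Int) := by
  induction l with
  | nil => simp
  | cons x xs ih =>
    have split : (really_bw.map (fun b => ((x :: xs).count b : Int))).sum
        = (really_bw.map (fun b => (xs.count b : Int))).sum
          + (really_bw.map (fun b => if b == x then (1 : Int) else 0)).sum := by
      rw [← List.sum_map_add]
      refine congrArg List.sum (List.map_congr_left ?_)
      intro b _
      simp only [List.count_cons]
      by_cases h : b = x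
      · simp [h]
      · have h' : ¬ x = b := fun hx => h hx.symm
        simp [h, h']
    have hcnt : (really_bw.count x : Int) = if x ∈ really_bw then (1 : Int) else 0 := by
      by_cases h : x ∈ really_bw
      · have := List.count_eq_one_of_mem (by decide : really_bw.Nodup) h
        simp [this, h]
      · simp [List.count_eq_zero_of_not_mem h, h]
    rw [split, sum_indicator_count, hcnt, ih, List.countP_cons]
    by_cases h : x ∈ really_bw <;> simp [h]

lemma score_bw_alt_closed (l : List String) :
    score_bw_alt l = (l.length : Int) + 9 * (l.countP (fun x => decide (x ∈ really_bw)) : Int) := by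
  unfold score_bw_alt
  have hget : ∀ b : String,
      (l.foldl (fun d w => d.insert w (d.getD w 0 + 1)) (PySem.Dict.empty : PySem.Dict String Int)).getD b 0
        = (l.count b : Int) := by
    intro b
    simpa using PySem.Dict.getD_foldl_insert_add_one l (PySem.Dict.empty : PySem.Dict String Int) b
  calc really_bw.foldl (fun total b =>
          total + 9 * (l.foldl (fun d w => d.insert w (d.getD w 0 + 1)) PySem.Dict.empty).getD b 0)
          (l.length : Int)
      = really_bw.foldl (fun total b => total + 9 * (l.count b : Int)) (l.length : Int) := by
        refine PySem.List.foldl_congr_mem really_bw _ _ (l.length : Int) ?_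
        intro acc b _
        rw [hget b]
    _ = (l.length : Int) + 9 * (l.countP (fun x => decide (x ∈ really_bw)) : Int) := by
        rw [foldl_nine_count, sum_counts_eq_countP]

-- ===== VERDICT =====
theorem score_bw_spec : Claim_equal_score_bw := by
  intro l _
  show score_bw l = score_bw_alt l
  rw [score_bw_alt_closed]
  simpa using score_bw_foldl_acc l 0
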